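-- pv_equiv track=rewrite | github.com/ymzhang0/sabr | src/aris_apps/aiida/specializations.py | _normalize_query_values
-- ===== SOURCE A (Python) =====
-- from typing import Any, Mapping, Sequence
--
-- def _normalize_text_list(values: Sequence[Any] | None) -> list[str]:
--     normalized: list[str] = []
--     seen: set[str] = set()
--     for value in values or []:
--         text = str(value or "").strip()
--         if not text:
--             continue
--         lowered = text.lower()
--         if lowered in seen:
--             continue
--         seen.add(lowered)
--         normalized.append(text)
--     return normalized
--
-- def _normalize_query_values(values: Sequence[Any] | None) -> list[str]:
--     exploded: list[str] = []
--     for value in values or []: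
--         text = str(value or "").strip()
--         if not text:
--             continue
--         parts = [part.strip() for part in text.split(",") if part.strip()]
--         if parts:
--             exploded.extend(parts)
--         else:
--             exploded.append(text)
--     return _normalize_text_list(exploded)
-- ===== SOURCE B (Python) =====
-- def _normalize_query_values(values):
--     seen = set()
--     out = []
--     for value in values or []:
--         text = str(value or "").strip()
--         if not text:
--             continue
--         parts = [p.strip() for p in text.split(",") if p.strip()]
--         for item in parts or [text]:
--             low = item.lower()
--             if low not in seen:
--                 seen.add(low)
--                 out.append(item)
--     return out
-- ===== Notes on version B (the rewrite author's own statement) =====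
-- stated objective: simpler
-- what changed: B fuses A's two sequential passes (explode all values into an intermediate list, then dedup it with a helper) into a single loop that dedups each value's items as they are produced, so the intermediate exploded list and the helper call disappear.
import Mathlib
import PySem

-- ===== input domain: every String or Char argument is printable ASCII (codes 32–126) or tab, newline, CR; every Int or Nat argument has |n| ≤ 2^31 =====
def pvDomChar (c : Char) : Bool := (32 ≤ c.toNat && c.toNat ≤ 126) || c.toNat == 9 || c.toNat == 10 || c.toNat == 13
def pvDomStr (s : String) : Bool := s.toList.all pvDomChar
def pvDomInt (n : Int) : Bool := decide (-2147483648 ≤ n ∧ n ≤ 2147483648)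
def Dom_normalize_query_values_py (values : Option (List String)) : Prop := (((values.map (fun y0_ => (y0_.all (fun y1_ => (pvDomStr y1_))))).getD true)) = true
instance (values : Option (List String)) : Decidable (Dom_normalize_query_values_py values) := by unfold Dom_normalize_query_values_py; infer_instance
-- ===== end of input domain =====

-- B fuses A's two sequential passes (explode into a list, then dedup it) into one loop that
-- dedups each value's items as they are produced (objective: simpler, no intermediate list).
-- Inputs are strings, so Python's `str(value or "")` is `value` itself (empty stays empty).

-- ===== PORT A =====
-- parts = [part.strip() for part in text.split(",") if part.strip()]
-- (the separator is the literal ",", never empty, so split? always returns some)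
def pvParts (text : String) : List String :=
  (((PySem.Str.split? text ",").getD []).map PySem.Str.strip).filter (fun p => p != "")

-- loop body of _normalize_query_values's exploding pass
def pvExplodeStep (exploded : List String) (value : String) : List String :=
  let text := PySem.Str.strip value
  if text = "" then exploded
  else
    let parts := pvParts text
    if parts ≠ [] then exploded ++ parts else exploded ++ [text]

-- loop body of _normalize_text_list; state = (seen, normalized)
def pvNtlStep (st : PySem.Set String × List String) (value : String) :
    PySem.Set String × List String :=
  let text := PySem.Str.strip value
  if text = "" then st
  else
    let lowered := PySem.Str.lower text
    if PySem.Set.contains st.1 lowered then st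
    else (PySem.Set.add st.1 lowered, st.2 ++ [text])

-- port of _normalize_text_list
def pvNtl (xs : List String) : List String :=
  (xs.foldl pvNtlStep (PySem.Set.empty, [])).2

def normalize_query_values_py (values : Option (List String)) : List String :=
  pvNtl ((values.getD []).foldl pvExplodeStep [])

-- ===== PORT B =====
-- inner loop body of B: dedup one item (already stripped and non-empty by construction)
def pvItemStep (st : PySem.Set String × List String) (item : String) :
    PySem.Set String × List String :=
  let low := PySem.Str.lower item
  if PySem.Set.contains st.1 low then st
  else (PySem.Set.add st.1 low, st.2 ++ [item])

-- outer loop body of B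
def pvBStep (st : PySem.Set String × List String) (value : String) :
    PySem.Set String × List String :=
  let text := PySem.Str.strip value
  if text = "" then st
  else
    let parts := pvParts text
    let items := if parts = [] then [text] else parts
    items.foldl pvItemStep st

def normalize_query_values_py_alt (values : Option (List String)) : List String :=
  ((values.getD []).foldl pvBStep (PySem.Set.empty, [])).2

-- ===== PRECONDITION & SPEC =====
def Spec_normalize_query_values_py (values : Option (List String)) (out : List String) : Prop := out = normalize_query_values_py_alt values
instance (values : Option (List String)) (out : List String) : Decidable (Spec_normalize_query_values_py values out) := by unfold Spec_normalize_query_values_py; infer_instance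

-- ===== CLAIM (what is proved, stated in full; the proofs are below) =====
def Claim_equal_normalize_query_values_py : Prop := ∀ (values : Option (List String)), Dom_normalize_query_values_py values → Spec_normalize_query_values_py values (normalize_query_values_py values)

-- ===== LEMMAS AND PROOFS =====

-- the chunk of items one input value contributes to A's exploded list
def pvChunk (value : String) : List String :=
  let text := PySem.Str.strip value
  if text = "" then []
  else
    let parts := pvParts text
    if parts = [] then [text] else parts

theorem pv_dropWhile_prefix_fixed (p : Char → Bool) (t u : List Char)
    (ht : t.dropWhile p = t) (hu : u <+: t) : u.dropWhile p = u := by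
  cases u with
  | nil => simp
  | cons a u' =>
    obtain ⟨rest, hrest⟩ := hu
    have hpa : p a = false := by
      by_contra h
      have hpa' : p a = true := by revert h; cases p a <;> simp
      rw [← hrest] at ht
      simp only [List.cons_append, List.dropWhile_cons, hpa', if_true] at ht
      have h1 := List.length_dropWhile_le p (u' ++ rest)
      have h2 := congrArg List.length ht
      simp at h1 h2
      omega
    simp [hpa]

theorem pv_rstrip_prefix (t : List Char) : PySem.Chars.rstrip t <+: t := by
  simpa [PySem.Chars.rstrip] using
    (List.dropWhile_suffix (l := t.reverse) PySem.Chars.isspace).reverse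

theorem pv_rstrip_idem (u : List Char) :
    PySem.Chars.rstrip (PySem.Chars.rstrip u) = PySem.Chars.rstrip u := by
  simp [PySem.Chars.rstrip, List.dropWhile_idempotent]

theorem pv_chars_strip_idem (s : List Char) :
    PySem.Chars.strip (PySem.Chars.strip s) = PySem.Chars.strip s := by
  unfold PySem.Chars.strip
  have hl : (PySem.Chars.lstrip s).dropWhile PySem.Chars.isspace = PySem.Chars.lstrip s := by
    simp [PySem.Chars.lstrip, List.dropWhile_idempotent]
  have h1 : PySem.Chars.lstrip (PySem.Chars.rstrip (PySem.Chars.lstrip s))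
      = PySem.Chars.rstrip (PySem.Chars.lstrip s) := by
    exact pv_dropWhile_prefix_fixed _ _ _ hl (pv_rstrip_prefix _)
  rw [h1, pv_rstrip_idem]

theorem pv_str_strip_idem (s : String) :
    PySem.Str.strip (PySem.Str.strip s) = PySem.Str.strip s := by
  simp [PySem.Str.strip, String.toList_ofList, pv_chars_strip_idem]

-- every item of a value's chunk is strip-fixed and non-empty
theorem pv_chunk_prop (v : String) :
    ∀ x ∈ pvChunk v, PySem.Str.strip x = x ∧ x ≠ "" := by
  intro x hx
  unfold pvChunk at hx
  by_cases h : PySem.Str.strip v = ""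
  · simp [h] at hx
  · simp only [h, if_false] at hx
    by_cases hp : pvParts (PySem.Str.strip v) = []
    · simp [hp] at hx
      subst hx
      exact ⟨pv_str_strip_idem v, h⟩
    · simp [hp] at hx
      unfold pvParts at hx
      obtain ⟨hxmem, hxne⟩ := List.mem_filter.mp hx
      obtain ⟨q, _, hq⟩ := List.mem_map.mp hxmem
      refine ⟨?_, by simpa using hxne⟩
      rw [← hq, pv_str_strip_idem]

-- A's exploding pass is the concatenation of the chunks
theorem pv_explode_eq (l : List String) (acc : List String) :
    l.foldl pvExplodeStep acc = acc ++ l.flatMap pvChunk := by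
  have h : ∀ (acc : List String) (v : String),
      pvExplodeStep acc v = acc ++ pvChunk v := by
    intro acc v
    unfold pvExplodeStep pvChunk
    by_cases h : PySem.Str.strip v = "" <;>
      by_cases hp : pvParts (PySem.Str.strip v) = [] <;> simp [h, hp]
  calc l.foldl pvExplodeStep acc
      = l.foldl (fun acc x => acc ++ pvChunk x) acc := by
        exact List.foldl_ext _ _ acc (fun a x _ => h a x)
    _ = acc ++ l.flatMap pvChunk := PySem.List.foldl_append_eq_flatMap _ _ _

-- B's body equals the dedup pass on the chunk
theorem pv_bstep_eq (st : PySem.Set String × List String) (v : String) :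
    pvBStep st v = (pvChunk v).foldl pvNtlStep st := by
  unfold pvBStep pvChunk
  by_cases h : PySem.Str.strip v = ""
  · simp [h]
  · simp only [h, if_false]
    have hitems : (if pvParts (PySem.Str.strip v) = [] then [PySem.Str.strip v]
        else pvParts (PySem.Str.strip v))
        = pvChunk v := by
      unfold pvChunk; simp [h]
    rw [hitems]
    exact List.foldl_ext _ _ st (fun st' x hx => by
      obtain ⟨hfix, hne⟩ := pv_chunk_prop v x hx
      unfold pvNtlStep pvItemStep
      simp [hfix, hne])

-- B's whole loop equals the dedup pass on the concatenated chunks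
theorem pv_b_eq_ntl (l : List String) (st : PySem.Set String × List String) :
    l.foldl pvBStep st = (l.flatMap pvChunk).foldl pvNtlStep st := by
  induction l generalizing st with
  | nil => simp
  | cons v l ih =>
    simp only [List.foldl_cons, List.flatMap_cons, List.foldl_append]
    rw [pv_bstep_eq, ih]

-- ===== VERDICT (by name: the statement is the Claim_ definition above) =====
theorem normalize_query_values_py_spec : Claim_equal_normalize_query_values_py := by
  intro values _
  unfold Spec_normalize_query_values_py normalize_query_values_py normalize_query_values_py_alt pvNtl
  rw [pv_explode_eq, pv_b_eq_ntl]
  simp
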